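-- pv_equiv track=rewrite | github.com/jamesonmccowan/espresso | research/unicode.py | gen_partitions
-- ===== SOURCE A (Python) =====
-- from collections.abc import Iterable
-- from typing import TypeAlias, Optional, TypeVar, Callable
--
-- MAX_NGRAM = 3
--
-- Partition: TypeAlias = tuple[str, ...]
--
-- def gen_partitions(word: str) -> Iterable[Partition]:
-- 	if len(word) == 0:
-- 		yield ()
-- 		return
--
-- 	for i in range(1, min(MAX_NGRAM, len(word)) + 1):
-- 		first = (word[:i],)
-- 		for p in gen_partitions(word[i:]):
-- 			yield first + p
-- ===== SOURCE B (Python) =====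
-- MAX_NGRAM = 3
--
-- def gen_partitions(word):
-- 	# Iterative DFS with an explicit stack of (remaining suffix, partition prefix);
-- 	# children are pushed in reverse chunk-length order so the shortest chunk is popped first,
-- 	# reproducing the recursive generator's order.
-- 	stack = [(word, ())]
-- 	while stack:
-- 		suffix, prefix = stack.pop()
-- 		if not suffix:
-- 			yield prefix
-- 		else:
-- 			for i in range(min(MAX_NGRAM, len(suffix)), 0, -1):
-- 				stack.append((suffix[i:], prefix + (suffix[:i],)))
-- ===== Notes on version B (the rewrite author's own statement) =====
-- stated objective: alternative
-- what changed: Replaces A's recursive generator (recursion on the suffix, concatenating the first chunk onto each recursive partition) with an iterative depth-first search over an explicit stack of (remaining suffix, partition prefix) states, pushing the 3..1-length children in reverse so pops reproduce A's yield order exactly.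
import Mathlib
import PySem

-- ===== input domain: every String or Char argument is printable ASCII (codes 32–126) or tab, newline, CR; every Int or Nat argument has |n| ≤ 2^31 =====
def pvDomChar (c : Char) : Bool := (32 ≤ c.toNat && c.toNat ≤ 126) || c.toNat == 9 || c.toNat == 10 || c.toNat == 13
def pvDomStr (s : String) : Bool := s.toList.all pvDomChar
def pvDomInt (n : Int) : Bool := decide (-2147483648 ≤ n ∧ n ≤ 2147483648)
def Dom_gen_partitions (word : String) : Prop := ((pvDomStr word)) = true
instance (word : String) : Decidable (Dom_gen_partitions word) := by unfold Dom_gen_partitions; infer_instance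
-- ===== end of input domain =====

-- B replaces A's recursive generator by an iterative explicit-stack DFS over (suffix, prefix)
-- states; same values in the same order (objective: alternative decomposition, not faster).
-- Both ports materialise the generators as the list of yielded partitions, in yield order.

-- ===== PORT A =====
-- A works on string suffixes; ported over List Char (word[:i] = take i, word[i:] = drop i for
-- 0 ≤ i ≤ len, exact). range(1, min(3, len)+1) = List.range' 1 (min 3 len).
def genPartsA (cs : List Char) : List (List String) :=
  if h : cs = [] then [[]]
  else
    (List.range' 1 (min 3 cs.length)).attach.flatMap fun ⟨i, hi⟩ =>
      (genPartsA (cs.drop i)).map fun p => String.ofList (cs.take i) :: p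
termination_by cs.length
decreasing_by
  simp only [List.mem_range'] at hi
  have hl : 0 < cs.length := List.length_pos_iff.mpr h
  simp only [List.length_drop]
  omega

def gen_partitions (word : String) : List (List String) := genPartsA word.toList

-- ===== PORT B =====
-- Explicit stack, head = top. Python pushes the children for i = m..1 onto the end and pops
-- from the end; prepending the children in order i = 1..m to a head-popped list is the same LIFO.
def pvStackMeasure (st : List (List Char × List String)) : Nat :=
  (st.map fun sp => 4 ^ sp.1.length).sum

def genPartsBLoop (st : List (List Char × List String)) (acc : List (List String)) :
    List (List String) :=
  match st with
  | [] => acc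
  | (s, p) :: rest =>
    if hs : s = [] then genPartsBLoop rest (acc ++ [p])
    else
      genPartsBLoop
        (((List.range' 1 (min 3 s.length)).map fun i =>
            (s.drop i, p ++ [String.ofList (s.take i)])) ++ rest) acc
termination_by pvStackMeasure st
decreasing_by
  · simp [pvStackMeasure, hs]
  · have hl : 0 < s.length := List.length_pos_iff.mpr hs
    simp only [pvStackMeasure, List.map_append, List.sum_append, List.map_map,
      List.map_cons, List.sum_cons]
    have h1 : ((List.range' 1 (min 3 s.length)).map
        ((fun sp => 4 ^ sp.1.length) ∘ fun i => (s.drop i, p ++ [String.ofList (s.take i)]))).sum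
        ≤ ((List.range' 1 (min 3 s.length)).map
        ((fun sp => 4 ^ sp.1.length) ∘ fun i => (s.drop i, p ++ [String.ofList (s.take i)]))).length
          • 4 ^ (s.length - 1) := by
      apply List.sum_le_card_nsmul
      intro x hx
      simp only [List.mem_map] at hx
      obtain ⟨i, hi, rfl⟩ := hx
      simp only [List.mem_range'] at hi
      simp only [Function.comp, List.length_drop]
      exact Nat.pow_le_pow_right (by norm_num) (by omega)
    simp only [smul_eq_mul, List.length_map, List.length_range'] at h1
    have h5 : min 3 s.length * 4 ^ (s.length - 1) ≤ 3 * 4 ^ (s.length - 1) :=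
      Nat.mul_le_mul_right _ (by omega)
    have h3 : 4 ^ s.length = 4 * 4 ^ (s.length - 1) := by
      conv_lhs => rw [show s.length = (s.length - 1) + 1 by omega]
      ring
    have h4 : 0 < 4 ^ (s.length - 1) := Nat.pow_pos (by norm_num)
    omega

def gen_partitions_alt (word : String) : List (List String) :=
  genPartsBLoop [(word.toList, [])] []

-- ===== PRECONDITION & SPEC =====
def Spec_gen_partitions (word : String) (out : List (List String)) : Prop := out = gen_partitions_alt word
instance (word : String) (out : List (List String)) : Decidable (Spec_gen_partitions word out) := by unfold Spec_gen_partitions; infer_instance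

-- ===== CLAIM (what is proved, stated in full; the proofs are below) =====
def Claim_equal_gen_partitions : Prop := ∀ (word : String), Dom_gen_partitions word → Spec_gen_partitions word (gen_partitions word)

-- ===== LEMMAS AND PROOFS =====

theorem genPartsA_nil : genPartsA [] = [[]] := by
  rw [genPartsA]; simp

theorem genPartsA_ne (cs : List Char) (h : cs ≠ []) :
    genPartsA cs = (List.range' 1 (min 3 cs.length)).flatMap fun i =>
      (genPartsA (cs.drop i)).map fun p => String.ofList (cs.take i) :: p := by
  rw [genPartsA]
  simp [h, List.flatMap, List.map_subtype, List.unattach_attach]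

theorem genPartsBLoop_spec (st : List (List Char × List String)) (acc : List (List String)) :
    genPartsBLoop st acc =
      acc ++ st.flatMap fun sp => (genPartsA sp.1).map fun q => sp.2 ++ q := by
  induction st, acc using genPartsBLoop.induct with
  | case1 acc => simp [genPartsBLoop]
  | case2 acc p rest ih =>
    rw [genPartsBLoop]
    simp [ih, genPartsA_nil]
  | case3 acc s p rest hs ih =>
    rw [genPartsBLoop, dif_neg hs, ih]
    simp only [List.flatMap_cons, List.flatMap_append]
    rw [genPartsA_ne s hs]
    simp [List.flatMap_map, List.map_flatMap, List.map_map, Function.comp_def, List.append_assoc]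

-- ===== VERDICT (by name: the statement is the Claim_ definition above) =====
theorem gen_partitions_spec : Claim_equal_gen_partitions := by
  intro word _
  unfold Spec_gen_partitions gen_partitions gen_partitions_alt
  rw [genPartsBLoop_spec]
  simp
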